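-- pv_equiv track=rewrite | github.com/tychart/312-project-3 | venv/lib/python3.12/site-packages/byu_pytest_utils/cpp_utils.py | diff_outputs
-- ===== SOURCE A (Python) =====
-- def diff_outputs(left: str, right: str):
--     left_lines = left.splitlines()
--     right_lines = right.splitlines()
--     left_width = max((len(line) for line in left_lines)) if left_lines else 1
--     right_width = max((len(line)
--                       for line in right_lines)) if right_lines else 1
--     left_view_lines = [f"{line:<{left_width}}" for line in left_lines]
--     right_view_lines = [f"{line:<{right_width}}" for line in right_lines]
--
--     # Pad with empty lines
--     while len(left_view_lines) < len(right_view_lines):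
--         left_view_lines.append(' ' * left_width)
--     while len(right_view_lines) < len(left_view_lines):
--         right_view_lines.append(' ' * right_width)
--
--     # Join lines side by side
--     diff_view = [
--         'Observed (left) == Expected (right)',
--         *(l + ' | ' + r for l, r in zip(left_view_lines, right_view_lines))
--     ]
--     return '\n'.join(diff_view)
-- ===== SOURCE B (Python) =====
-- def diff_outputs(left: str, right: str):
--     # Canvas approach: allocate a grid of blank rows with the ' | ' separator
--     # pre-drawn, then write each line's characters into its row/column in place.
--     left_lines = left.splitlines()
--     right_lines = right.splitlines()
--     lw = max(map(len, left_lines), default=1)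
--     rw = max(map(len, right_lines), default=1)
--     n = max(len(left_lines), len(right_lines))
--     canvas = [list(' ' * lw + ' | ' + ' ' * rw) for _ in range(n)]
--     for i, line in enumerate(left_lines):
--         canvas[i][:len(line)] = line
--     for i, line in enumerate(right_lines):
--         canvas[i][lw + 3:lw + 3 + len(line)] = line
--     return '\n'.join(['Observed (left) == Expected (right)',
--                       *(''.join(row) for row in canvas)])
-- ===== Notes on version B (the rewrite author's own statement) =====
-- stated objective: alternative
-- what changed: Instead of left-padding each line, extending the shorter list with blank lines and zipping, B allocates a character canvas (one mutable row of spaces with the ' | ' separator pre-drawn per output line) and writes each left/right line's characters into its row and column in place before joining.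
import Mathlib
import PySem

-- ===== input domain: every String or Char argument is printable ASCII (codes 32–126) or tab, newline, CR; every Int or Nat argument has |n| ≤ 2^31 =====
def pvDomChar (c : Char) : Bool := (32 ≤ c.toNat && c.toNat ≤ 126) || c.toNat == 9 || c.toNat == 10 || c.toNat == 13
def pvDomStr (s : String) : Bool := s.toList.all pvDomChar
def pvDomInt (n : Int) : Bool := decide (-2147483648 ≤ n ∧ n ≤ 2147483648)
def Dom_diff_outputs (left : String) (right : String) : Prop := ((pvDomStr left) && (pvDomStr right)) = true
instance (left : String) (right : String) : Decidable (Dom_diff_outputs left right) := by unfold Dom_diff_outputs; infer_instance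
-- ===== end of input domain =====

-- B replaces A's pad-each-line / extend-the-shorter-list / zip construction by a character
-- canvas: blank rows with the separator pre-drawn, into which the lines are written in place.

-- ===== PORT A =====

-- f"{line:<{w}}" for ASCII text: left-justify by appending spaces
def pvLjust (l : List Char) (w : Nat) : List Char := l ++ List.replicate (w - l.length) ' '

-- A's `' ' * width` fill line
def pvSpaces (w : Nat) : List Char := List.replicate w ' '

-- A's `max((len(line) for line in lines)) if lines else 1`
def pvWidthA (lines : List (List Char)) : Nat :=
  if lines.isEmpty then 1 else lines.foldl (fun m l => max m l.length) 0

-- A's `while len(a) < n: a.append(fill)`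
def pvPadTo (a : List (List Char)) (n : Nat) (fill : List Char) : List (List Char) :=
  if _h : a.length < n then pvPadTo (a ++ [fill]) n fill else a
termination_by n - a.length
decreasing_by simp; omega

def diff_outputs (left : String) (right : String) : String :=
  let left_lines := PySem.Chars.splitlines left.toList
  let right_lines := PySem.Chars.splitlines right.toList
  let left_width := pvWidthA left_lines
  let right_width := pvWidthA right_lines
  let left_view_lines := left_lines.map (fun l => pvLjust l left_width)
  let right_view_lines := right_lines.map (fun l => pvLjust l right_width)
  let left_view_lines := pvPadTo left_view_lines right_view_lines.length (pvSpaces left_width)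
  let right_view_lines := pvPadTo right_view_lines left_view_lines.length (pvSpaces right_width)
  let diff_view := "Observed (left) == Expected (right)".toList ::
    (left_view_lines.zip right_view_lines).map (fun p => p.1 ++ " | ".toList ++ p.2)
  String.ofList (PySem.Chars.join ['\n'] diff_view)

-- ===== PORT B =====

-- Python list slice assignment `row[start:start+len(cs)] = cs`
-- (exact when start + cs.length ≤ row.length, which always holds here)
def pvSplice (row : List Char) (start : Nat) (cs : List Char) : List Char :=
  row.take start ++ cs ++ row.drop (start + cs.length)

def diff_outputs_alt (left : String) (right : String) : String :=
  let left_lines := PySem.Chars.splitlines left.toList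
  let right_lines := PySem.Chars.splitlines right.toList
  -- max(map(len, lines), default=1)
  let lw := PySem.List.maxD (left_lines.map List.length) id 1
  let rw := PySem.List.maxD (right_lines.map List.length) id 1
  let n := max left_lines.length right_lines.length
  -- canvas = [list(' '*lw + ' | ' + ' '*rw) for _ in range(n)]
  let canvas := List.replicate n (List.replicate lw ' ' ++ " | ".toList ++ List.replicate rw ' ')
  -- for i, line in enumerate(left_lines): canvas[i][:len(line)] = line
  -- (enumerate indices start at 0, so .toNat is exact)
  let canvas := (PySem.List.enumerate left_lines).foldl
      (fun c p => c.modify p.1.toNat (fun row => pvSplice row 0 p.2)) canvas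
  -- for i, line in enumerate(right_lines): canvas[i][lw+3:lw+3+len(line)] = line
  let canvas := (PySem.List.enumerate right_lines).foldl
      (fun c p => c.modify p.1.toNat (fun row => pvSplice row (lw + 3) p.2)) canvas
  String.ofList (PySem.Chars.join ['\n']
    ("Observed (left) == Expected (right)".toList :: canvas))

-- ===== PRECONDITION & SPEC =====
def Spec_diff_outputs (left : String) (right : String) (out : String) : Prop := out = diff_outputs_alt left right
instance (left : String) (right : String) (out : String) : Decidable (Spec_diff_outputs left right out) := by unfold Spec_diff_outputs; infer_instance

-- ===== CLAIM =====
def Claim_equal_diff_outputs : Prop := ∀ (left : String) (right : String), Dom_diff_outputs left right → Spec_diff_outputs left right (diff_outputs left right)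

-- ===== LEMMAS AND PROOFS =====

-- the shape both sides are reduced to: one row per output line, built structurally
def pvRows (lw rw : Nat) : Nat → List (List Char) → List (List Char) → List (List Char)
  | 0, _, _ => []
  | n + 1, ls, rs =>
      (pvLjust (ls.headD []) lw ++ " | ".toList ++ pvLjust (rs.headD []) rw)
        :: pvRows lw rw n ls.tail rs.tail

theorem pvPadTo_eq (n : Nat) (x : List Char) :
    ∀ (k : Nat) (a : List (List Char)), n - a.length = k →
      pvPadTo a n x = a ++ List.replicate k x := by
  intro k
  induction k with
  | zero =>
      intro a hk
      unfold pvPadTo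
      split
      · omega
      · simp
  | succ k ih =>
      intro a hk
      unfold pvPadTo
      split
      · rw [ih (a ++ [x]) (by simp; omega)]
        simp [List.replicate_succ]
      · omega

theorem pvWidthA_eq_maxD (lines : List (List Char)) :
    pvWidthA lines = PySem.List.maxD (lines.map List.length) id 1 := by
  cases lines with
  | nil => simp [pvWidthA, PySem.List.maxD, PySem.List.max?]
  | cons l ls =>
      simp only [pvWidthA, List.isEmpty_cons, Bool.false_eq_true, if_false,
        PySem.List.maxD, PySem.List.max?, List.map_cons, List.foldl_cons,
        Nat.zero_max]
      suffices hgen : ∀ (g : Option Nat → Nat → Option Nat),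
          (∀ m x, g (some m) x = some (max m x)) →
          ∀ (ys : List (List Char)) (m : Nat),
            ys.foldl (fun m l => max m l.length) m =
              (List.foldl g (some m) (ys.map List.length)).getD 1 by
        refine hgen _ ?_ ls l.length
        intro m x
        show (if id m < id x then some x else some m) = some (max m x)
        simp only [id_eq]
        split <;> (congr 1; omega)
      intro g hg ys
      induction ys with
      | nil => intro m; rfl
      | cons y ys ih =>
          intro m
          simp only [List.foldl_cons, List.map_cons, hg]
          exact ih (max m y.length)

theorem pvLjust_nil (w : Nat) : pvLjust [] w = pvSpaces w := by
  simp [pvLjust, pvSpaces]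

-- every line's length is bounded by A's width (hence by maxD via pvWidthA_eq_maxD)
theorem len_le_pvWidthA (lines : List (List Char)) (l : List Char) (hl : l ∈ lines) :
    l.length ≤ pvWidthA lines := by
  have hmono : ∀ (ys : List (List Char)) (m : Nat), m ≤ ys.foldl (fun a b => max a b.length) m := by
    intro ys
    induction ys with
    | nil => intro m; exact le_refl m
    | cons y ys ih => intro m; exact le_trans (le_max_left m y.length) (ih (max m y.length))
  have hmem : ∀ (ys : List (List Char)) (m : Nat), l ∈ ys → l.length ≤ ys.foldl (fun a b => max a b.length) m := by
    intro ys
    induction ys with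
    | nil => intro m h; cases h
    | cons y ys ih =>
        intro m h
        rcases List.mem_cons.mp h with h | h
        · subst h
          exact le_trans (le_max_right m l.length) (hmono ys (max m l.length))
        · exact ih (max m y.length) h
  have : ¬ lines.isEmpty = true := by
    cases lines with
    | nil => cases hl
    | cons a t => simp
  simp only [pvWidthA, this]
  exact hmem lines 0 hl

-- A's padded-zip list equals pvRows
theorem rows_eq (lw rw : Nat) :
    ∀ (n : Nat) (ls rs : List (List Char)), n = max ls.length rs.length →
      ((ls.map (fun l => pvLjust l lw) ++ List.replicate (rs.length - ls.length) (pvSpaces lw)).zip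
        (rs.map (fun l => pvLjust l rw) ++ List.replicate (ls.length - rs.length) (pvSpaces rw))).map
          (fun p => p.1 ++ " | ".toList ++ p.2)
        = pvRows lw rw n ls rs := by
  intro n
  induction n with
  | zero =>
      intro ls rs h
      have h1 : ls = [] := by
        cases ls with
        | nil => rfl
        | cons a t => exfalso; simp only [List.length_cons] at h; omega
      have h2 : rs = [] := by
        cases rs with
        | nil => rfl
        | cons a t => exfalso; simp only [List.length_cons] at h; omega
      subst h1; subst h2; rfl
  | succ n ih =>
      intro ls rs h
      cases ls with
      | nil =>
          cases rs with
          | nil => simp at h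
          | cons r rs' =>
              have hn : n = max ([] : List (List Char)).length rs'.length := by
                simp at h ⊢; omega
              simp only [List.map_nil, List.nil_append, List.map_cons, List.length_nil,
                List.length_cons, Nat.sub_zero, Nat.zero_sub, List.replicate_succ,
                List.replicate_zero, List.append_nil, List.zip_cons_cons, List.map_cons,
                pvRows, List.headD, List.tail]
              rw [pvLjust_nil]
              congr 1
              simpa using ih [] rs' hn
      | cons l ls' =>
          cases rs with
          | nil =>
              have hn : n = max ls'.length ([] : List (List Char)).length := by
                simp at h ⊢; omega
              simp only [List.map_cons, List.map_nil, List.nil_append, List.length_nil,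
                List.length_cons, Nat.sub_zero, Nat.zero_sub, List.replicate_succ,
                List.replicate_zero, List.append_nil, List.zip_cons_cons, List.map_cons,
                pvRows, List.headD, List.tail]
              rw [pvLjust_nil]
              congr 1
              simpa using ih ls' [] hn
          | cons r rs' =>
              have hn : n = max ls'.length rs'.length := by simp at h ⊢; omega
              simp only [List.map_cons, List.length_cons, Nat.succ_sub_succ,
                List.cons_append, List.zip_cons_cons, List.map_cons,
                pvRows, List.headD, List.tail]
              congr 1
              exact ih ls' rs' hn

theorem padded_rows (lw rw : Nat) (ll rl : List (List Char)) :
    ((pvPadTo (ll.map fun l => pvLjust l lw) (rl.map fun l => pvLjust l rw).length (pvSpaces lw)).zip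
      (pvPadTo (rl.map fun l => pvLjust l rw)
        (pvPadTo (ll.map fun l => pvLjust l lw) (rl.map fun l => pvLjust l rw).length (pvSpaces lw)).length
        (pvSpaces rw))).map
        (fun p => p.1 ++ " | ".toList ++ p.2)
      = pvRows lw rw (max ll.length rl.length) ll rl := by
  rw [pvPadTo_eq _ _ (rl.length - ll.length) _ (by simp)]
  rw [pvPadTo_eq _ _ (ll.length - rl.length) _ (by simp; omega)]
  exact rows_eq lw rw (max ll.length rl.length) ll rl (by omega)

-- ===== B-side: characterising the canvas folds =====

-- applying g to the first xs.length rows, pointwise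
def applyPref (g : List Char → List Char → List Char) :
    List (List Char) → List (List Char) → List (List Char)
  | [], rest => rest
  | _ :: _, [] => []
  | x :: xs, r :: rs => g x r :: applyPref g xs rs

theorem applyPref_length (g : List Char → List Char → List Char) :
    ∀ (xs c : List (List Char)), xs.length ≤ c.length → (applyPref g xs c).length = c.length := by
  intro xs
  induction xs with
  | nil => intro c _; simp [applyPref]
  | cons x xs ih =>
      intro c h
      cases c with
      | nil => simp at h
      | cons r rs =>
          simp only [applyPref, List.length_cons]
          rw [ih rs (by simpa using Nat.le_of_succ_le_succ h)]

theorem modify_append {α : Type} (f : α → α) :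
    ∀ (a : List α) (x : α) (b : List α), (a ++ x :: b).modify a.length f = a ++ f x :: b := by
  intro a
  induction a with
  | nil => intro x b; simp [List.modify]
  | cons y ys ih => intro x b; simp [ih]

theorem foldl_enum_modify (g : List Char → List Char → List Char) :
    ∀ (xs : List (List Char)) (done rest : List (List Char)), xs.length ≤ rest.length →
      (PySem.List.enumerate xs (done.length : Int)).foldl
          (fun c p => c.modify p.1.toNat (fun row => g p.2 row)) (done ++ rest)
        = done ++ applyPref g xs rest := by
  intro xs
  induction xs with
  | nil => intro done rest _; simp [PySem.List.enumerate_nil, applyPref]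
  | cons x xs ih =>
      intro done rest hlen
      cases rest with
      | nil => simp at hlen
      | cons r rs =>
          rw [PySem.List.enumerate_cons, List.foldl_cons]
          have h1 : ((done.length : Int)).toNat = done.length := by simp
          simp only [h1, modify_append]
          have h2 : ((done.length : Int) + 1) = (((done ++ [g x r]).length : Nat) : Int) := by
            simp
          rw [h2]
          have h3 := ih (done ++ [g x r]) rs (by simpa using Nat.le_of_succ_le_succ hlen)
          simp only [List.append_assoc, List.singleton_append] at h3 ⊢
          exact h3

-- writing a left line into a blank row
theorem spliceL (lw rw : Nat) (l : List Char) (hl : l.length ≤ lw) :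
    pvSplice (List.replicate lw ' ' ++ " | ".toList ++ List.replicate rw ' ') 0 l
      = pvLjust l lw ++ " | ".toList ++ List.replicate rw ' ' := by
  simp only [pvSplice, List.take_zero, List.nil_append, Nat.zero_add, pvLjust,
    List.append_assoc]
  rw [List.drop_append_of_le_length (by simpa using hl), List.drop_replicate]

-- writing a right line into a row whose left part is already width lw
theorem spliceR (lw rw : Nat) (x r : List Char) (hx : x.length = lw) (_hr : r.length ≤ rw) :
    pvSplice (x ++ " | ".toList ++ List.replicate rw ' ') (lw + 3) r
      = x ++ " | ".toList ++ pvLjust r rw := by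
  have hxl : (x ++ " | ".toList).length = lw + 3 := by simp [hx]
  unfold pvSplice pvLjust
  rw [show lw + 3 + r.length = (x ++ " | ".toList).length + r.length from by omega,
      List.drop_append, List.drop_replicate,
      show lw + 3 = (x ++ " | ".toList).length from hxl.symm, List.take_left]
  simp

theorem pvLjust_length (l : List Char) (w : Nat) (h : l.length ≤ w) : (pvLjust l w).length = w := by
  simp [pvLjust]; omega

theorem applyPref_both (lw rw : Nat) :
    ∀ (n : Nat) (ll rl : List (List Char)),
      (∀ l ∈ ll, l.length ≤ lw) → (∀ r ∈ rl, r.length ≤ rw) → n = max ll.length rl.length →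
      applyPref (fun r row => pvSplice row (lw + 3) r) rl
        (applyPref (fun l row => pvSplice row 0 l) ll
          (List.replicate n (List.replicate lw ' ' ++ " | ".toList ++ List.replicate rw ' ')))
        = pvRows lw rw n ll rl := by
  intro n
  induction n with
  | zero =>
      intro ll rl _ _ h
      have h1 : ll = [] := by
        cases ll with
        | nil => rfl
        | cons a t => exfalso; simp only [List.length_cons] at h; omega
      have h2 : rl = [] := by
        cases rl with
        | nil => rfl
        | cons a t => exfalso; simp only [List.length_cons] at h; omega
      subst h1; subst h2; rfl
  | succ n ih =>
      intro ll rl hL hR h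
      cases ll with
      | nil =>
          cases rl with
          | nil => simp at h
          | cons r rs =>
              have hn : n = max ([] : List (List Char)).length rs.length := by
                simp at h ⊢; omega
              simp only [List.replicate_succ, applyPref, pvRows, List.headD, List.tail]
              have hblank : List.replicate lw ' ' ++ " | ".toList ++ List.replicate rw ' '
                  = pvLjust [] lw ++ " | ".toList ++ List.replicate rw ' ' := by
                rw [pvLjust_nil]; rfl
              rw [hblank, spliceR lw rw _ r (pvLjust_length [] lw (by simp)) (hR r List.mem_cons_self)]
              congr 1
              exact ih [] rs (by simp) (fun x hx => hR x (List.mem_cons_of_mem _ hx)) hn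
      | cons l ls =>
          cases rl with
          | nil =>
              have hn : n = max ls.length ([] : List (List Char)).length := by
                simp at h ⊢; omega
              simp only [List.replicate_succ, applyPref, pvRows, List.headD, List.tail]
              rw [spliceL lw rw l (hL l List.mem_cons_self)]
              have := ih ls [] (fun x hx => hL x (List.mem_cons_of_mem _ hx)) (by simp) hn
              simp only [applyPref] at this ⊢
              rw [this]
              rw [pvLjust_nil]; rfl
          | cons r rs =>
              have hn : n = max ls.length rs.length := by simp at h ⊢; omega
              simp only [List.replicate_succ, applyPref, pvRows, List.headD, List.tail]
              rw [spliceL lw rw l (hL l List.mem_cons_self),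
                spliceR lw rw _ r (pvLjust_length l lw (hL l List.mem_cons_self)) (hR r List.mem_cons_self)]
              congr 1
              exact ih ls rs (fun x hx => hL x (List.mem_cons_of_mem _ hx))
                (fun x hx => hR x (List.mem_cons_of_mem _ hx)) hn

theorem diff_outputs_eq_alt (left right : String) :
    diff_outputs left right = diff_outputs_alt left right := by
  unfold diff_outputs diff_outputs_alt
  dsimp only
  rw [pvWidthA_eq_maxD, pvWidthA_eq_maxD, padded_rows]
  set ll := PySem.Chars.splitlines left.toList with hll
  set rl := PySem.Chars.splitlines right.toList with hrl
  set lw := PySem.List.maxD (ll.map List.length) id 1 with hlw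
  set rw' := PySem.List.maxD (rl.map List.length) id 1 with hrw
  have hlwA : pvWidthA ll = lw := pvWidthA_eq_maxD ll
  have hrwA : pvWidthA rl = rw' := pvWidthA_eq_maxD rl
  have h1 : (PySem.List.enumerate ll).foldl
      (fun c p => c.modify p.1.toNat (fun row => pvSplice row 0 p.2))
      (List.replicate (max ll.length rl.length)
        (List.replicate lw ' ' ++ " | ".toList ++ List.replicate rw' ' '))
      = applyPref (fun l row => pvSplice row 0 l) ll
          (List.replicate (max ll.length rl.length)
            (List.replicate lw ' ' ++ " | ".toList ++ List.replicate rw' ' ')) := by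
    have := foldl_enum_modify (fun l row => pvSplice row 0 l) ll []
      (List.replicate (max ll.length rl.length)
        (List.replicate lw ' ' ++ " | ".toList ++ List.replicate rw' ' '))
      (by simp)
    simpa using this
  have hlen2 : rl.length ≤ (applyPref (fun l row => pvSplice row 0 l) ll
      (List.replicate (max ll.length rl.length)
        (List.replicate lw ' ' ++ " | ".toList ++ List.replicate rw' ' '))).length := by
    rw [applyPref_length _ ll _ (by simp)]
    simp
  have h2 := foldl_enum_modify (fun r row => pvSplice row (lw + 3) r) rl []
      (applyPref (fun l row => pvSplice row 0 l) ll
        (List.replicate (max ll.length rl.length)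
          (List.replicate lw ' ' ++ " | ".toList ++ List.replicate rw' ' ')))
      hlen2
  simp only [List.nil_append, List.length_nil, Nat.cast_zero] at h1 h2
  rw [h1, h2]
  rw [applyPref_both lw rw' (max ll.length rl.length) ll rl
    (fun l hl => hlwA ▸ len_le_pvWidthA ll l hl)
    (fun r hr => hrwA ▸ len_le_pvWidthA rl r hr) rfl]

-- ===== VERDICT =====
theorem diff_outputs_spec : Claim_equal_diff_outputs := by
  intro left right _
  unfold Spec_diff_outputs
  exact diff_outputs_eq_alt left right
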